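-- pv_equiv track=rewrite | github.com/peterfumich/TSI_Websocket | TDA.py | Diagram_to_Dimension_Arrays
-- ===== SOURCE A (Python) =====
-- def Diagram_to_Dimension_Arrays(diag):
--     out_diags = []
--     for i in range(2):
--         dim_diag = []
--         for x in diag:
--             if x[0] == i:
--                 dim_diag.append(x[1])
--         out_diags.append(dim_diag)
--     return(out_diags)
-- ===== SOURCE B (Python) =====
-- def Diagram_to_Dimension_Arrays(diag):
--     out0 = []
--     out1 = []
--     for x in diag:
--         if x[0] == 0:
--             out0.append(x[1])
--         elif x[0] == 1:
--             out1.append(x[1])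
--     return [out0, out1]
-- ===== Notes on version B (the rewrite author's own statement) =====
-- stated objective: simpler
-- what changed: Replaces A's two passes over diag (one per dimension) with a single pass that dispatches each entry into its bucket.
import Mathlib
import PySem

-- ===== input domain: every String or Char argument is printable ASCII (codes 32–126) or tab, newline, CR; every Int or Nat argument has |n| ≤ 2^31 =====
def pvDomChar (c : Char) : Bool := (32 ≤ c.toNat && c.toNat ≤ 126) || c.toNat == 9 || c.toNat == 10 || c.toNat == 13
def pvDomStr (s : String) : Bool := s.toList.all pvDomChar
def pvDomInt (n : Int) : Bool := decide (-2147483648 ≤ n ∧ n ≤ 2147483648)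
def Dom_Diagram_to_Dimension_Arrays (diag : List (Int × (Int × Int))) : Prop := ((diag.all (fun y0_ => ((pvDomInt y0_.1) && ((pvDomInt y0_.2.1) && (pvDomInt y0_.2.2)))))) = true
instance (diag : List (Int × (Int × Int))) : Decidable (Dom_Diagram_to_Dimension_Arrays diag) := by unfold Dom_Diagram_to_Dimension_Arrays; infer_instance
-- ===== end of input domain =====

-- B is a single pass over diag dispatching each entry to its bucket, replacing A's two filtering passes.

-- ===== PORT A =====
-- for i in range(2): inner loop filters diag for x[0] == i, then appends the bucket
def Diagram_to_Dimension_Arrays (diag : List (Int × (Int × Int))) : List (List (Int × Int)) :=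
  (PySem.List.pyRange 0 2 1).foldl
    (fun out_diags i =>
      let dim_diag := diag.foldl
        (fun dim_diag x => if x.1 == i then dim_diag ++ [x.2] else dim_diag) []
      out_diags ++ [dim_diag]) []

-- ===== PORT B =====
-- single loop over diag with two accumulators
def Diagram_to_Dimension_Arrays_alt (diag : List (Int × (Int × Int))) : List (List (Int × Int)) :=
  let s := diag.foldl
    (fun (s : List (Int × Int) × List (Int × Int)) x =>
      if x.1 == 0 then (s.1 ++ [x.2], s.2)
      else if x.1 == 1 then (s.1, s.2 ++ [x.2])
      else s) ([], [])
  [s.1, s.2]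

-- ===== PRECONDITION & SPEC =====
def Spec_Diagram_to_Dimension_Arrays (diag : List (Int × (Int × Int))) (out : List (List (Int × Int))) : Prop := out = Diagram_to_Dimension_Arrays_alt diag
instance (diag : List (Int × (Int × Int))) (out : List (List (Int × Int))) : Decidable (Spec_Diagram_to_Dimension_Arrays diag out) := by unfold Spec_Diagram_to_Dimension_Arrays; infer_instance

-- ===== CLAIM (what is proved, stated in full; the proofs are below) =====
def Claim_equal_Diagram_to_Dimension_Arrays : Prop := ∀ (diag : List (Int × (Int × Int))), Dom_Diagram_to_Dimension_Arrays diag → Spec_Diagram_to_Dimension_Arrays diag (Diagram_to_Dimension_Arrays diag)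

-- ===== LEMMAS AND PROOFS =====

-- B's single pass computes, componentwise, A's two filtering passes.
theorem pv_fold_pair (diag : List (Int × (Int × Int))) (a b : List (Int × Int)) :
    diag.foldl
      (fun (s : List (Int × Int) × List (Int × Int)) x =>
        if x.1 == 0 then (s.1 ++ [x.2], s.2)
        else if x.1 == 1 then (s.1, s.2 ++ [x.2])
        else s) (a, b)
    = (diag.foldl (fun d x => if x.1 == (0 : Int) then d ++ [x.2] else d) a,
       diag.foldl (fun d x => if x.1 == (1 : Int) then d ++ [x.2] else d) b) := by
  induction diag generalizing a b with
  | nil => rfl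
  | cons y ys ih =>
    simp only [List.foldl_cons, beq_iff_eq] at ih ⊢
    by_cases h0 : y.1 = 0
    · simp only [h0, if_pos rfl]; exact ih _ _
    · by_cases h1 : y.1 = 1
      · simp only [if_neg h0, h1, if_pos rfl]; exact ih _ _
      · simp only [if_neg h0, if_neg h1]; exact ih _ _

-- ===== VERDICT (by name: the statement is the Claim_ definition above) =====
theorem Diagram_to_Dimension_Arrays_spec : Claim_equal_Diagram_to_Dimension_Arrays := by
  intro diag _
  unfold Spec_Diagram_to_Dimension_Arrays Diagram_to_Dimension_Arrays Diagram_to_Dimension_Arrays_alt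
  rw [pv_fold_pair]
  rfl
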